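-- pv_equiv track=rewrite | github.com/algoritmiaUS/ada-byron | 2024/regional-andaluza/problem_k/solution.py | encontrar_palabra_maxima
-- ===== SOURCE A (Python) =====
-- def contar_letras(texto):
--     contador = {}
--     for letra in texto:
--         if letra in contador:
--             contador[letra] += 1
--         else:
--             contador[letra] = 1
--     return contador
--
-- def puede_formar_palabra(palabra, dicc_letras):
--     dicc_letras_actual = contar_letras(palabra)
--     for letra, cantidad in dicc_letras_actual.items():
--         if cantidad > dicc_letras.get(letra, 0):
--             return False
--     return True
--
-- def encontrar_palabra_maxima(letras, palabras):
--     dicc_letras = contar_letras(letras)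
--     mejor_palabra = ""
--
--     for palabra in palabras:
--         if puede_formar_palabra(palabra, dicc_letras):
--             # Seleccionar la palabra más larga o en orden lexicográfico si tienen el mismo tamaño
--             if len(palabra) > len(mejor_palabra) or (len(palabra) == len(mejor_palabra) and palabra < mejor_palabra):
--                 mejor_palabra = palabra
--
--     return mejor_palabra if mejor_palabra else "No es posible"
-- ===== SOURCE B (Python) =====
-- def contar_letras(texto):
--     contador = {}
--     for letra in texto:
--         if letra in contador:
--             contador[letra] += 1
--         else:
--             contador[letra] = 1
--     return contador
--
--
-- def puede_formar_palabra(palabra, dicc_letras):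
--     dicc_letras_actual = contar_letras(palabra)
--     for letra, cantidad in dicc_letras_actual.items():
--         if cantidad > dicc_letras.get(letra, 0):
--             return False
--     return True
--
--
-- def encontrar_palabra_maxima(letras, palabras):
--     # Filter once, then pick the longest length and the lexicographically
--     # smallest word of that length, instead of a running best.
--     dicc_letras = contar_letras(letras)
--     formables = [p for p in palabras if p and puede_formar_palabra(p, dicc_letras)]
--     if not formables:
--         return "No es posible"
--     mejor_len = max(len(p) for p in formables)
--     return min(p for p in formables if len(p) == mejor_len)
-- ===== Notes on version B (the rewrite author's own statement) =====
-- stated objective: alternative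
-- what changed: Replaces A's single-pass running-best fold (longer-or-lex-smaller comparison against the current best) by a filter-then-select decomposition: build the list of formable non-empty words once, take the maximum length, and return the lexicographically smallest word of that length via the min/max builtins.
import Mathlib
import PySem

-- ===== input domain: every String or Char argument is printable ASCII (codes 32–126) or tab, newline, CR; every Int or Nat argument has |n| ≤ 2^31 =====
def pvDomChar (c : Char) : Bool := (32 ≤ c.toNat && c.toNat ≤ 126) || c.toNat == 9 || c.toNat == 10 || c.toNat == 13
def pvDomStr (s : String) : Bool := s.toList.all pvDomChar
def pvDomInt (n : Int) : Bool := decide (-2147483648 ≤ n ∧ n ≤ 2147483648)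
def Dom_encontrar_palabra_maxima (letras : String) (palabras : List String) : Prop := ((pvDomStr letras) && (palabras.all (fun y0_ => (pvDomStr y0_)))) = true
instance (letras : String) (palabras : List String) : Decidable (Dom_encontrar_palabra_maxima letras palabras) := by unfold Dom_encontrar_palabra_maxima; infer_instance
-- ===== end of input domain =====

-- B replaces A's running-best fold by filter-then-max-length-then-lexicographic-min (alternative decomposition, same cost).


-- ===== PORT A =====
-- contar_letras: build a character-count dict by the if-in-dict pattern, exactly as A does
def pvContar (texto : List Char) : PySem.Dict Char Int :=
  texto.foldl
    (fun contador letra =>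
      if contador.contains letra then contador.insert letra (contador.getD letra 0 + 1)
      else contador.insert letra 1)
    PySem.Dict.empty

-- puede_formar_palabra's for-loop with early 'return False', as structural recursion over the items
def pvPuedeLoop (dicc_letras : PySem.Dict Char Int) : List (Char × Int) → Bool
  | [] => true
  | (letra, cantidad) :: rest =>
      if cantidad > dicc_letras.getD letra 0 then false else pvPuedeLoop dicc_letras rest

def pvPuedeFormar (palabra : String) (dicc_letras : PySem.Dict Char Int) : Bool :=
  pvPuedeLoop dicc_letras (pvContar palabra.toList).items

def encontrar_palabra_maxima (letras : String) (palabras : List String) : String :=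
  let dicc_letras := pvContar letras.toList
  let mejor_palabra := palabras.foldl
    (fun mejor_palabra palabra =>
      if pvPuedeFormar palabra dicc_letras = true then
        if PySem.Str.len palabra > PySem.Str.len mejor_palabra ∨
            (PySem.Str.len palabra = PySem.Str.len mejor_palabra ∧ palabra < mejor_palabra) then
          palabra
        else mejor_palabra
      else mejor_palabra)
    ""
  if mejor_palabra = "" then "No es posible" else mejor_palabra

-- ===== PORT B =====
def encontrar_palabra_maxima_alt (letras : String) (palabras : List String) : String :=
  let dicc_letras := pvContar letras.toList
  let formables := palabras.filter (fun p => (p != "") && pvPuedeFormar p dicc_letras)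
  match PySem.List.max? (formables.map (fun p => PySem.Str.len p)) (fun x => x) with
  | none => "No es posible"                    -- 'if not formables: return "No es posible"'
  | some mejor_len =>
    match PySem.List.min? (formables.filter (fun p => PySem.Str.len p == mejor_len)) (fun p => p) with
    | some m => m
    | none => "No es posible"                  -- unreachable: the list contains a word of length mejor_len

-- ===== PRECONDITION & SPEC =====
def Spec_encontrar_palabra_maxima (letras : String) (palabras : List String) (out : String) : Prop := out = encontrar_palabra_maxima_alt letras palabras
instance (letras : String) (palabras : List String) (out : String) : Decidable (Spec_encontrar_palabra_maxima letras palabras out) := by unfold Spec_encontrar_palabra_maxima; infer_instance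

-- ===== CLAIM (what is proved, stated in full; the proofs are below) =====
def Claim_equal_encontrar_palabra_maxima : Prop := ∀ (letras : String) (palabras : List String), Dom_encontrar_palabra_maxima letras palabras → Spec_encontrar_palabra_maxima letras palabras (encontrar_palabra_maxima letras palabras)

-- ===== LEMMAS AND PROOFS =====
-- the strict "better word" order A's comparison implements: longer, or same length and lexicographically smaller
abbrev pvKlt (p q : String) : Prop :=
  PySem.Str.len p > PySem.Str.len q ∨ (PySem.Str.len p = PySem.Str.len q ∧ p < q)

-- A's selection loop, over an arbitrary formability predicate g
def pvFoldA (g : String → Bool) (init : String) (l : List String) : String :=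
  l.foldl
    (fun mejor_palabra palabra =>
      if g palabra = true then
        if pvKlt palabra mejor_palabra then palabra else mejor_palabra
      else mejor_palabra)
    init


theorem pvKlt_irrefl (p : String) : ¬ pvKlt p p := by
  simp [pvKlt]

theorem pvKlt_trans {p q r : String} (h1 : pvKlt p q) (h2 : pvKlt q r) : pvKlt p r := by
  rcases h1 with h1 | ⟨h1, h1'⟩ <;> rcases h2 with h2 | ⟨h2, h2'⟩
  · exact Or.inl (lt_trans h2 h1)
  · exact Or.inl (h2 ▸ h1)
  · exact Or.inl (h1 ▸ h2)
  · exact Or.inr ⟨h1.trans h2, lt_trans h1' h2'⟩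

theorem pvKlt_total {p q : String} (h : p ≠ q) : pvKlt p q ∨ pvKlt q p := by
  rcases lt_trichotomy (PySem.Str.len p) (PySem.Str.len q) with hl | hl | hl
  · exact Or.inr (Or.inl hl)
  · rcases lt_trichotomy p q with hs | hs | hs
    · exact Or.inl (Or.inr ⟨hl, hs⟩)
    · exact absurd hs h
    · exact Or.inr (Or.inr ⟨hl.symm, hs⟩)
  · exact Or.inl (Or.inl hl)

theorem pvLen_nonneg (p : String) : 0 ≤ PySem.Str.len p := by
  simp [PySem.Str.len_eq]

theorem pvLen_pos {p : String} (h : p ≠ "") : 0 < PySem.Str.len p := by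
  rw [PySem.Str.len_eq]
  have hne : p.toList ≠ [] := by simp [h]
  exact_mod_cast List.length_pos_iff.mpr hne

theorem pvKlt_empty_right {p : String} (h : p ≠ "") : pvKlt p "" := by
  refine Or.inl ?_
  have := pvLen_pos h
  simpa [PySem.Str.len_eq] using this

theorem pvNot_klt_empty (q : String) : ¬ pvKlt "" q := by
  rintro (h | ⟨h1, h2⟩)
  · have := pvLen_nonneg q
    rw [PySem.Str.len_eq] at h this
    simp at h
    omega
  · rw [PySem.Str.len_eq, PySem.Str.len_eq] at h1
    have hnil : ("" : String).toList = [] := rfl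
    rw [hnil] at h1
    simp only [List.length_nil, Nat.cast_zero] at h1
    have h1' : q.toList.length = 0 := by exact_mod_cast h1.symm
    have hq : q = "" := String.toList_eq_nil_iff.mp (List.length_eq_zero_iff.mp h1')
    subst hq
    exact lt_irrefl _ h2

theorem pvFoldA_cons (g : String → Bool) (init p : String) (t : List String) :
    pvFoldA g init (p :: t)
      = pvFoldA g (if g p = true then (if pvKlt p init then p else init) else init) t := by
  by_cases h : g p = true <;> by_cases h2 : pvKlt p init <;> simp [pvFoldA, h, h2]

-- the result of A's loop is the initial value or a good, non-empty member of the list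
theorem pvFoldA_mem (g : String → Bool) (l : List String) (init : String) :
    pvFoldA g init l = init ∨
      (pvFoldA g init l ∈ l ∧ g (pvFoldA g init l) = true ∧ pvFoldA g init l ≠ "") := by
  induction l generalizing init with
  | nil => exact Or.inl rfl
  | cons p t ih =>
    rw [pvFoldA_cons]
    by_cases hg : g p = true
    · by_cases hk : pvKlt p init
      · simp only [hg, if_true, hk, if_true]
        have hpne : p ≠ "" := by
          rintro rfl; exact pvNot_klt_empty init hk
        rcases ih p with h | ⟨h1, h2, h3⟩
        · rw [h]
          exact Or.inr ⟨List.mem_cons_self, hg, hpne⟩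
        · exact Or.inr ⟨List.mem_cons_of_mem _ h1, h2, h3⟩
      · simp only [hg, if_true, hk, if_false]
        rcases ih init with h | ⟨h1, h2, h3⟩
        · exact Or.inl h
        · exact Or.inr ⟨List.mem_cons_of_mem _ h1, h2, h3⟩
    · simp only [hg, Bool.false_eq_true, if_false]
      rcases ih init with h | ⟨h1, h2, h3⟩
      · exact Or.inl h
      · exact Or.inr ⟨List.mem_cons_of_mem _ h1, h2, h3⟩

-- no good element of the list beats the result of A's loop, and the loop never worsens its start
theorem pvFoldA_min (g : String → Bool) (l : List String) (init : String) :
    (∀ q ∈ l, g q = true → ¬ pvKlt q (pvFoldA g init l)) ∧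
      (pvFoldA g init l = init ∨ pvKlt (pvFoldA g init l) init) := by
  induction l generalizing init with
  | nil => exact ⟨by simp, Or.inl rfl⟩
  | cons p t ih =>
    rw [pvFoldA_cons]
    by_cases hg : g p = true
    · by_cases hk : pvKlt p init
      · simp only [hg, if_true, hk, if_true]
        obtain ⟨ihmin, ihle⟩ := ih p
        refine ⟨?_, ?_⟩
        · intro q hq hgq
          rcases List.mem_cons.mp hq with rfl | hq'
          · intro hc
            rcases ihle with h | h
            · rw [h] at hc
              exact pvKlt_irrefl _ hc
            · exact pvKlt_irrefl _ (pvKlt_trans hc h)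
          · exact ihmin q hq' hgq
        · rcases ihle with h | h
          · exact Or.inr (by rw [h]; exact hk)
          · exact Or.inr (pvKlt_trans h hk)
      · simp only [hg, if_true, hk, if_false]
        obtain ⟨ihmin, ihle⟩ := ih init
        refine ⟨?_, ihle⟩
        intro q hq hgq
        rcases List.mem_cons.mp hq with rfl | hq'
        · intro hc
          rcases ihle with h | h
          · rw [h] at hc
            exact hk hc
          · exact hk (pvKlt_trans hc h)
        · exact ihmin q hq' hgq
    · simp only [hg, Bool.false_eq_true, if_false]
      obtain ⟨ihmin, ihle⟩ := ih init
      refine ⟨?_, ihle⟩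
      intro q hq hgq
      rcases List.mem_cons.mp hq with rfl | hq'
      · exact absurd hgq (by simp [hg])
      · exact ihmin q hq' hgq

-- membership in B's filtered list
theorem pvMem_S (g : String → Bool) (palabras : List String) (p : String) :
    p ∈ palabras.filter (fun p => (p != "") && g p)
      ↔ p ∈ palabras ∧ p ≠ "" ∧ g p = true := by
  simp [List.mem_filter]

-- the selection itself: A's running best with the "longer, or equal and smaller" rule
-- equals B's max-length-then-lexicographic-min, for any formability predicate g
theorem pvSelect (g : String → Bool) (palabras : List String) :
    (if pvFoldA g "" palabras = "" then "No es posible" else pvFoldA g "" palabras)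
      = (match PySem.List.max?
            ((palabras.filter (fun p => (p != "") && g p)).map (fun p => PySem.Str.len p))
            (fun x => x) with
         | none => "No es posible"
         | some mejor_len =>
           match PySem.List.min?
               ((palabras.filter (fun p => (p != "") && g p)).filter
                 (fun p => PySem.Str.len p == mejor_len))
               (fun p => p) with
           | some m => m
           | none => "No es posible") := by
  set S := palabras.filter (fun p => (p != "") && g p) with hSdef
  obtain ⟨hmin, -⟩ := pvFoldA_min g palabras ""
  have hmem := pvFoldA_mem g palabras ""
  by_cases hS : S = []
  · -- nothing formable and non-empty: both sides say "No es posible"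
    have hr : pvFoldA g "" palabras = "" := by
      rcases hmem with h | ⟨h1, h2, h3⟩
      · exact h
      · exact absurd ((pvMem_S g palabras _).mpr ⟨h1, h3, h2⟩) (by simp [← hSdef, hS])
    rw [hS]
    simp [hr, PySem.List.max?]
  · -- S nonempty
    obtain ⟨L, hL⟩ : ∃ L, PySem.List.max? (S.map (fun p => PySem.Str.len p)) (fun x => x) = some L := by
      cases h : PySem.List.max? (S.map (fun p => PySem.Str.len p)) (fun x => x) with
      | none =>
        rw [PySem.List.max?_eq_none_iff, List.map_eq_nil_iff] at h
        exact absurd h hS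
      | some L => exact ⟨L, rfl⟩
    have hLmax : ∀ p ∈ S, PySem.Str.len p ≤ L := by
      intro p hp
      exact PySem.List.max?_isMax hL _ (List.mem_map_of_mem hp)
    obtain ⟨s, hsS, hsL⟩ : ∃ s ∈ S, PySem.Str.len s = L := by
      have := PySem.List.max?_mem hL
      rcases List.mem_map.mp this with ⟨s, hs1, hs2⟩
      exact ⟨s, hs1, hs2⟩
    have hsF : s ∈ S.filter (fun p => PySem.Str.len p == L) :=
      List.mem_filter.mpr ⟨hsS, by simp only [beq_iff_eq]; exact hsL⟩
    obtain ⟨m, hm⟩ : ∃ m, PySem.List.min? (S.filter (fun p => PySem.Str.len p == L)) (fun p => p) = some m := by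
      cases h : PySem.List.min? (S.filter (fun p => PySem.Str.len p == L)) (fun p => p) with
      | none =>
        rw [PySem.List.min?_eq_none_iff] at h
        rw [h] at hsF
        exact absurd hsF (List.not_mem_nil)
      | some m => exact ⟨m, rfl⟩
    have hmF := PySem.List.min?_mem hm
    have hmS : m ∈ S := (List.mem_filter.mp hmF).1
    have hmL : PySem.Str.len m = L := by
      have h2 := (List.mem_filter.mp hmF).2
      simp only [beq_iff_eq] at h2
      exact h2
    have hmlex : ∀ q ∈ S.filter (fun p => PySem.Str.len p == L), m ≤ q := by
      intro q hq
      exact PySem.List.min?_isMin hm q hq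
    -- B's pick m is minimal in S under pvKlt
    have hBmin : ∀ q ∈ S, ¬ pvKlt q m := by
      rintro q hq (hlt | ⟨heq, hlex⟩)
      · rw [hmL] at hlt
        exact absurd hlt (not_lt.mpr (hLmax q hq))
      · have hqF : q ∈ S.filter (fun p => PySem.Str.len p == L) :=
          List.mem_filter.mpr ⟨hq, by simp only [beq_iff_eq]; rw [heq, hmL]⟩
        exact absurd hlex (not_lt.mpr (hmlex q hqF))
    -- A's result r is a member of S
    obtain ⟨s0, hs0⟩ := List.exists_mem_of_ne_nil S hS
    have hs0' := (pvMem_S g palabras s0).mp hs0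
    have hrne : pvFoldA g "" palabras ≠ "" := by
      intro h
      rw [h] at hmin
      exact hmin s0 hs0'.1 hs0'.2.2 (pvKlt_empty_right hs0'.2.1)
    have hrS : pvFoldA g "" palabras ∈ S := by
      rcases hmem with h | ⟨h1, h2, h3⟩
      · exact absurd h hrne
      · exact (pvMem_S g palabras _).mpr ⟨h1, h3, h2⟩
    -- mutual minimality forces r = m
    have hrm : pvFoldA g "" palabras = m := by
      by_contra hne
      have hm' := (pvMem_S g palabras m).mp hmS
      rcases pvKlt_total hne with h | h
      · exact hBmin _ hrS h
      · exact hmin m hm'.1 hm'.2.2 h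
    simp only [hL, hm, hrm]
    rw [if_neg ((pvMem_S g palabras m).mp hmS).2.1]

-- ===== VERDICT (by name: the statement is the Claim_ definition above) =====
theorem encontrar_palabra_maxima_spec : Claim_equal_encontrar_palabra_maxima := by
  intro letras palabras _
  unfold Spec_encontrar_palabra_maxima
  exact pvSelect (fun p => pvPuedeFormar p (pvContar letras.toList)) palabras
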